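-- pv_equiv track=rewrite | github.com/LEQO-Framework/leqo-backend | app/transformation_manager/pre/size_casting.py | __increment_or_add_counter_str
-- ===== SOURCE A (Python) =====
-- def __increment_or_add_counter_str(name: str) -> str:
--     """
--     Increment the number at the end of a string by one or append '_0'.
--     """
--     prefix = ""
--     maybe_number = name
--     while True:
--         if maybe_number == "":
--             return prefix + "_0"
--         if maybe_number.isdecimal():
--             return prefix + str(int(maybe_number) + 1)
--         prefix, maybe_number = prefix + maybe_number[0], maybe_number[1:]
-- ===== SOURCE B (Python) =====
-- def __increment_or_add_counter_str(name: str) -> str: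
--     # Single backwards scan for the trailing digit run, then one increment.
--     k = 0  # length of the trailing digit run
--     while k < len(name) and name[len(name) - 1 - k].isdigit():
--         k += 1
--     if k == 0:
--         return name + "_0"
--     split = len(name) - k
--     return name[:split] + str(int(name[split:]) + 1)
-- ===== Notes on version B (the rewrite author's own statement) =====
-- stated objective: faster
-- what changed: Instead of re-testing every suffix with isdecimal/int inside a loop (quadratic rescans), B scans backwards once to find the trailing digit run and performs a single slice+int+increment.
import Mathlib
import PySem

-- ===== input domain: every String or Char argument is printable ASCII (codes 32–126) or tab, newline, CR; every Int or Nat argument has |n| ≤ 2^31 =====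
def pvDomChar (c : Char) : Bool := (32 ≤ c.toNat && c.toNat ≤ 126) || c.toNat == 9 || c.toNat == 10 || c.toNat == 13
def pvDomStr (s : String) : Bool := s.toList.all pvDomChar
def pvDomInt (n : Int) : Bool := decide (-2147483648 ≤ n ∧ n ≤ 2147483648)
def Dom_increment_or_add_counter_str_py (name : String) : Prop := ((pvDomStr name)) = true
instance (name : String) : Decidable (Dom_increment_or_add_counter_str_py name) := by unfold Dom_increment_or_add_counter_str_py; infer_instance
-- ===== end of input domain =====

-- B replaces A's per-suffix isdecimal/int rescans by one backwards scan for the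
-- trailing digit run followed by a single increment.

-- ===== PORT A =====
-- s.isdecimal() : nonempty and all decimal digits; on the ASCII domain decimal = '0'..'9' = isdigit
def pyIsdecimal (cs : List Char) : Bool := !cs.isEmpty && cs.all PySem.Chars.isdigit

-- the while-loop of A: state (prefix, maybe_number), one char moved per iteration
def incLoopA (pre : List Char) (rest : List Char) : List Char :=
  match rest with
  | [] => pre ++ ['_', '0']
  | c :: t =>
    if pyIsdecimal (c :: t) then
      pre ++ PySem.Int.toChars ((PySem.Int.ofChars? (c :: t)).getD 0 + 1)  -- int() succeeds: all digits
    else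
      incLoopA (pre ++ [c]) t

def increment_or_add_counter_str_py (name : String) : String :=
  String.ofList (incLoopA [] name.toList)

-- ===== PORT B =====
-- the backwards digit scan of Source B: k = (cs.reverse.takeWhile isdigit).length
def incCoreB (cs : List Char) : List Char :=
  if cs.reverse.takeWhile PySem.Chars.isdigit = [] then cs ++ ['_', '0']
  else
    cs.take (cs.length - (cs.reverse.takeWhile PySem.Chars.isdigit).length) ++
      PySem.Int.toChars
        ((PySem.Int.ofChars? (cs.reverse.takeWhile PySem.Chars.isdigit).reverse).getD 0 + 1)

def increment_or_add_counter_str_py_alt (name : String) : String :=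
  String.ofList (incCoreB name.toList)

-- ===== PRECONDITION & SPEC =====
def Spec_increment_or_add_counter_str_py (name : String) (out : String) : Prop := out = increment_or_add_counter_str_py_alt name
instance (name : String) (out : String) : Decidable (Spec_increment_or_add_counter_str_py name out) := by unfold Spec_increment_or_add_counter_str_py; infer_instance

-- ===== CLAIM (what is proved, stated in full; the proofs are below) =====
def Claim_equal_increment_or_add_counter_str_py : Prop := ∀ (name : String), Dom_increment_or_add_counter_str_py name → Spec_increment_or_add_counter_str_py name (increment_or_add_counter_str_py name)

-- ===== LEMMAS AND PROOFS =====

lemma takeWhile_append_of_all {α : Type} (p : α → Bool) (l₁ l₂ : List α)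
    (h : l₁.all p = true) : (l₁ ++ l₂).takeWhile p = l₁ ++ l₂.takeWhile p := by
  induction l₁ with
  | nil => simp
  | cons c t ih =>
    simp only [List.all_cons, Bool.and_eq_true] at h
    simp [h.1, ih h.2]

lemma takeWhile_append_of_not_all {α : Type} (p : α → Bool) (l₁ l₂ : List α)
    (h : l₁.all p = false) : (l₁ ++ l₂).takeWhile p = l₁.takeWhile p := by
  induction l₁ with
  | nil => simp at h
  | cons c t ih =>
    simp only [List.all_cons, Bool.and_eq_false_iff] at h
    by_cases hc : p c = true
    · have ht : t.all p = false := by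
        rcases h with h | h
        · exact absurd hc (by simp [h])
        · exact h
      simp [List.takeWhile, hc, ih ht]
    · simp [List.takeWhile, Bool.eq_false_iff.mpr hc]

-- when c::t is not all digits, the trailing digit run of c::t is that of t
lemma takeWhile_reverse_cons (p : Char → Bool) (c : Char) (t : List Char)
    (h : (c :: t).all p = false) :
    (c :: t).reverse.takeWhile p = t.reverse.takeWhile p := by
  rw [List.reverse_cons]
  by_cases ht : t.all p = true
  · have hc : p c = false := by
      simp only [List.all_cons, Bool.and_eq_false_iff] at h
      rcases h with h | h
      · exact h
      · exact absurd ht (by simp [h])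
    rw [takeWhile_append_of_all p _ _ (by simpa using ht)]
    rw [(List.takeWhile_eq_self_iff (p := p) (l := t.reverse)).mpr (by
      intro x hx; exact List.all_eq_true.mp ht x (List.mem_reverse.mp hx))]
    simp [List.takeWhile, hc]
  · exact takeWhile_append_of_not_all p _ _
      (by simpa using (Bool.eq_false_iff.mpr ht : t.all p = false))

-- stepping one char off a non-decimal string keeps B's shape
lemma incCoreB_cons (c : Char) (t : List Char)
    (h : (c :: t).all PySem.Chars.isdigit = false) :
    incCoreB (c :: t) = c :: incCoreB t := by
  have htw := takeWhile_reverse_cons PySem.Chars.isdigit c t h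
  have hlen : (t.reverse.takeWhile PySem.Chars.isdigit).length ≤ t.length := by
    have := (List.takeWhile_prefix (p := PySem.Chars.isdigit) (l := t.reverse)).length_le
    simpa using this
  by_cases he : t.reverse.takeWhile PySem.Chars.isdigit = []
  · unfold incCoreB
    rw [htw, he]
    simp
  · have htake : (c :: t).length - (t.reverse.takeWhile PySem.Chars.isdigit).length
        = (t.length - (t.reverse.takeWhile PySem.Chars.isdigit).length) + 1 := by
      simp only [List.length_cons]; omega
    unfold incCoreB
    rw [htw, if_neg he, if_neg he, htake, List.take_succ_cons]
    simp

-- A's loop, started with accumulator pre, prepends pre to B's core result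
lemma incLoopA_eq (rest : List Char) : ∀ (pre : List Char),
    incLoopA pre rest = pre ++ incCoreB rest := by
  induction rest with
  | nil => intro pre; simp [incLoopA, incCoreB]
  | cons c t ih =>
    intro pre
    by_cases h : pyIsdecimal (c :: t) = true
    · have hall : (c :: t).all PySem.Chars.isdigit = true := by
        simpa [pyIsdecimal] using h
      have htw : (c :: t).reverse.takeWhile PySem.Chars.isdigit = (c :: t).reverse :=
        List.takeWhile_eq_self_iff.mpr (by
          intro x hx
          exact (List.all_eq_true.mp hall) x (List.mem_reverse.mp hx))
      have hne : (c :: t).reverse ≠ [] := by simp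
      rw [incLoopA, if_pos h]
      unfold incCoreB
      rw [htw, if_neg hne]
      simp
    · have hall : (c :: t).all PySem.Chars.isdigit = false := by
        cases hh : (c :: t).all PySem.Chars.isdigit with
        | false => rfl
        | true => exact absurd (by simp [pyIsdecimal, hh]) h
      rw [incLoopA, if_neg h, ih, incCoreB_cons c t hall]
      simp

-- ===== VERDICT (by name: the statement is the Claim_ definition above) =====
theorem increment_or_add_counter_str_py_spec : Claim_equal_increment_or_add_counter_str_py := by
  intro name _
  unfold Spec_increment_or_add_counter_str_py increment_or_add_counter_str_py increment_or_add_counter_str_py_alt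
  rw [incLoopA_eq]
  rfl
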